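-- pv_equiv track=rewrite | github.com/zyra-project/zyra | src/zyra/swarm/planner.py | _pattern_from_filename
-- ===== SOURCE A (Python) =====
-- def _pattern_from_filename(name: str) -> str:
--     buf: list[str] = []
--     run = 0
--     for ch in name:
--         if ch.isdigit():
--             run += 1
--             continue
--         if run:
--             buf.append(rf"[0-9]{{{run}}}")
--             run = 0
--         if ch.isalnum():
--             buf.append(ch)
--         else:
--             buf.append("\\" + ch)
--     if run:
--         buf.append(rf"[0-9]{{{run}}}")
--     return "^" + "".join(buf) + "$"
-- ===== SOURCE B (Python) =====
-- def _pattern_from_filename(name: str) -> str: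
--     n = len(name)
--     starts = [i for i in range(n)
--               if name[i].isdigit() and (i == 0 or not name[i - 1].isdigit())]
--     ends = [i for i in range(n)
--             if name[i].isdigit() and (i == n - 1 or not name[i + 1].isdigit())]
--     parts = ["^"]
--     prev = 0
--     for s, e in zip(starts, ends):
--         for ch in name[prev:s]:
--             parts.append(ch if ch.isalnum() else "\\" + ch)
--         parts.append("[0-9]{%d}" % (e - s + 1))
--         prev = e + 1
--     for ch in name[prev:]:
--         parts.append(ch if ch.isalnum() else "\\" + ch)
--     return "".join(parts) + "$"
-- ===== Notes on version B (the rewrite author's own statement) =====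
-- stated objective: alternative
-- what changed: B replaces A's streaming per-character run-counter state machine with a staged index-based algorithm: two range comprehensions first compute the index lists of digit-run starts and ends, then the pattern is assembled by zipping those boundary lists, emitting one [0-9]{n} token per (start,end) pair and escaping the literal gap slices between runs.
import Mathlib
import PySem

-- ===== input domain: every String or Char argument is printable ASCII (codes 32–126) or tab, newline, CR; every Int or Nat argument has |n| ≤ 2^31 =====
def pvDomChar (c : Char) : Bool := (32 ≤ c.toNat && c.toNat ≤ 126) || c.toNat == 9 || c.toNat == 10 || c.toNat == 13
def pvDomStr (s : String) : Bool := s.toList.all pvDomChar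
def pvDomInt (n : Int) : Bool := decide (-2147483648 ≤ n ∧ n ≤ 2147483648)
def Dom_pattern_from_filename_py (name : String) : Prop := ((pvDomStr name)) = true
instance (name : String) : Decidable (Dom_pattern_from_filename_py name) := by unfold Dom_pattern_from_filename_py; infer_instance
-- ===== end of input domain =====

-- B replaces A's per-character run-counter state machine with a staged algorithm: two index comprehensions compute digit-run start/end boundaries, then the pattern is assembled by zipping them and escaping the gaps; same O(n) cost, different decomposition.


-- ===== PORT A =====
-- rf"[0-9]{{{run}}}"
def pvTok (run : Nat) : List Char :=
  ['[', '0', '-', '9', ']', '{'] ++ PySem.Int.toChars (run : Int) ++ ['}']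

-- the loop body: state is (buf, run)
def pvStepA (st : List (List Char) × Nat) (ch : Char) : List (List Char) × Nat :=
  if PySem.Chars.isdigit ch then (st.1, st.2 + 1)
  else
    let buf := if st.2 ≠ 0 then st.1 ++ [pvTok st.2] else st.1
    if PySem.Chars.isalnum ch then (buf ++ [[ch]], 0)
    else (buf ++ [['\\', ch]], 0)

def pattern_from_filename_py (name : String) : String :=
  let st := name.toList.foldl pvStepA ([], 0)
  let buf := if st.2 ≠ 0 then st.1 ++ [pvTok st.2] else st.1
  String.ofList ('^' :: PySem.Chars.join [] buf ++ ['$'])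

-- ===== PORT B =====
-- ch if ch.isalnum() else "\\" + ch
def pvEscB (c : Char) : List Char := if PySem.Chars.isalnum c then [c] else ['\\', c]

-- name[a:b] for 0 ≤ a, b ≤ len(name): Python's slice coincides with drop/take there
def pvSlice (cs : List Char) (a b : Nat) : List Char := (cs.drop a).take (b - a)

-- starts = [i for i in range(n) if name[i].isdigit() and (i == 0 or not name[i-1].isdigit())]
-- (name[i-1] is short-circuited away at i == 0, so the getD default is never the value used)
def pvStartsB (cs : List Char) : List Nat :=
  (List.range cs.length).filter (fun i =>
    PySem.Chars.isdigit (cs.getD i ' ') &&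
      (i == 0 || !PySem.Chars.isdigit (cs.getD (i - 1) ' ')))

-- ends = [i for i in range(n) if name[i].isdigit() and (i == n-1 or not name[i+1].isdigit())]
def pvEndsB (cs : List Char) : List Nat :=
  (List.range cs.length).filter (fun i =>
    PySem.Chars.isdigit (cs.getD i ' ') &&
      (i == cs.length - 1 || !PySem.Chars.isdigit (cs.getD (i + 1) ' ')))

-- loop body of `for s, e in zip(starts, ends)`: state is (parts flattened, prev)
def pvStepB (cs : List Char) (st : List Char × Nat) (se : Nat × Nat) : List Char × Nat :=
  (st.1 ++ (pvSlice cs st.2 se.1).flatMap pvEscB ++ pvTok (se.2 - se.1 + 1), se.2 + 1)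

def pattern_from_filename_py_alt (name : String) : String :=
  let cs := name.toList
  let st := ((pvStartsB cs).zip (pvEndsB cs)).foldl (pvStepB cs) (['^'], 0)
  String.ofList (st.1 ++ (pvSlice cs st.2 cs.length).flatMap pvEscB ++ ['$'])

-- ===== PRECONDITION & SPEC =====
def Spec_pattern_from_filename_py (name : String) (out : String) : Prop := out = pattern_from_filename_py_alt name
instance (name : String) (out : String) : Decidable (Spec_pattern_from_filename_py name out) := by unfold Spec_pattern_from_filename_py; infer_instance

-- ===== CLAIM (what is proved, stated in full; the proofs are below) =====
def Claim_equal_pattern_from_filename_py : Prop := ∀ (name : String), Dom_pattern_from_filename_py name → Spec_pattern_from_filename_py name (pattern_from_filename_py name)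

-- ===== LEMMAS AND PROOFS =====

-- the token list A's loop emits, with the buffer factored out and the pending run explicit
def pvEmit (run : Nat) : List Char → List (List Char)
  | [] => if run ≠ 0 then [pvTok run] else []
  | c :: cs =>
    if PySem.Chars.isdigit c then pvEmit (run + 1) cs
    else (if run ≠ 0 then [pvTok run] else []) ++ pvEscB c :: pvEmit 0 cs

theorem pvFoldA_eq_emit (cs : List Char) : ∀ (buf : List (List Char)) (run : Nat),
    (if (cs.foldl pvStepA (buf, run)).2 ≠ 0
      then (cs.foldl pvStepA (buf, run)).1 ++ [pvTok (cs.foldl pvStepA (buf, run)).2]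
      else (cs.foldl pvStepA (buf, run)).1) = buf ++ pvEmit run cs := by
  induction cs with
  | nil =>
    intro buf run
    by_cases h : run = 0 <;> simp [pvEmit, h]
  | cons c cs ih =>
    intro buf run
    by_cases hd : PySem.Chars.isdigit c
    · simp only [List.foldl_cons, pvStepA, if_pos hd, pvEmit]
      exact ih buf (run + 1)
    · by_cases hr : run = 0 <;>
        by_cases ha : PySem.Chars.isalnum c <;>
          simp [pvStepA, hd, hr, ha, pvEmit, pvEscB, ih]

theorem pvEmit_digits (ds : List Char) : ∀ (rest : List Char) (run : Nat),
    (∀ d ∈ ds, PySem.Chars.isdigit d = true) →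
    pvEmit run (ds ++ rest) = pvEmit (run + ds.length) rest := by
  induction ds with
  | nil => intro rest run _; simp
  | cons d ds ih =>
    intro rest run h
    have hd : PySem.Chars.isdigit d = true := h d (List.mem_cons_self ..)
    simp only [List.cons_append, pvEmit, if_pos hd]
    rw [ih rest (run + 1) (fun x hx => h x (List.mem_cons_of_mem _ hx))]
    congr 1
    rw [List.length_cons]
    omega

-- true iff the list does not begin with a digit (maximality of a run ending just before it)
def pvNoDigHead : List Char → Bool
  | [] => true
  | d :: _ => !PySem.Chars.isdigit d

-- recursive characterisations of the two boundary index lists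
def pvSRec (b : Bool) : List Char → List Nat
  | [] => []
  | c :: cs =>
    (if PySem.Chars.isdigit c && !b then [0] else []) ++ (pvSRec (PySem.Chars.isdigit c) cs).map (· + 1)

def pvERec : List Char → List Nat
  | [] => []
  | c :: cs =>
    (if PySem.Chars.isdigit c && pvNoDigHead cs then [0] else []) ++ (pvERec cs).map (· + 1)

-- starts, generalised over the "previous char was a digit" flag
def pvSFil (cs : List Char) (b : Bool) : List Nat :=
  (List.range cs.length).filter (fun i =>
    PySem.Chars.isdigit (cs.getD i ' ') &&
      (if i = 0 then !b else !PySem.Chars.isdigit (cs.getD (i - 1) ' ')))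

theorem pvStartsB_eq_sFil (cs : List Char) : pvStartsB cs = pvSFil cs false := by
  unfold pvStartsB pvSFil
  apply List.filter_congr
  intro i _
  cases i <;> simp

theorem pvSFil_cons (c : Char) (cs : List Char) (b : Bool) :
    pvSFil (c :: cs) b =
      (if PySem.Chars.isdigit c && !b then [0] else [])
        ++ (pvSFil cs (PySem.Chars.isdigit c)).map (· + 1) := by
  unfold pvSFil
  rw [List.length_cons, List.range_succ_eq_map, List.filter_cons]
  have hmap : (List.range cs.length).filter
        ((fun i => PySem.Chars.isdigit ((c :: cs).getD i ' ') &&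
          (if i = 0 then !b else !PySem.Chars.isdigit ((c :: cs).getD (i - 1) ' '))) ∘ Nat.succ)
      = (List.range cs.length).filter (fun i =>
          PySem.Chars.isdigit (cs.getD i ' ') &&
            (if i = 0 then !(PySem.Chars.isdigit c) else !PySem.Chars.isdigit (cs.getD (i - 1) ' '))) := by
    apply List.filter_congr
    intro i _
    cases i <;> simp
  rw [List.filter_map, hmap]
  by_cases hd : PySem.Chars.isdigit c && !b <;> simp [hd]

theorem pvSFil_eq_sRec (cs : List Char) : ∀ b, pvSFil cs b = pvSRec b cs := by
  induction cs with
  | nil => intro b; simp [pvSFil, pvSRec]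
  | cons c cs ih =>
    intro b
    rw [pvSFil_cons, pvSRec, ih]

theorem pvEndsB_eq_eRec (cs : List Char) : pvEndsB cs = pvERec cs := by
  induction cs with
  | nil => simp [pvEndsB, pvERec]
  | cons c cs ih =>
    unfold pvEndsB
    rw [List.length_cons, List.range_succ_eq_map, List.filter_cons]
    have hmap : (List.range cs.length).filter
          ((fun i => PySem.Chars.isdigit ((c :: cs).getD i ' ') &&
            (i == cs.length + 1 - 1 || !PySem.Chars.isdigit ((c :: cs).getD (i + 1) ' '))) ∘ Nat.succ)
        = (List.range cs.length).filter (fun i =>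
            PySem.Chars.isdigit (cs.getD i ' ') &&
              (i == cs.length - 1 || !PySem.Chars.isdigit (cs.getD (i + 1) ' '))) := by
      apply List.filter_congr
      intro i hi
      have hi' : i < cs.length := List.mem_range.mp hi
      have h : (i + 1 == cs.length) = (i == cs.length - 1) := by
        by_cases hc : i + 1 = cs.length
        · have h2 : i = cs.length - 1 := by omega
          simp [h2]
          omega
        · have h2 : i ≠ cs.length - 1 := by omega
          simp [hc, h2]
      simp [h]
    rw [List.filter_map, hmap, ← pvEndsB, ih, pvERec]
    by_cases hd : PySem.Chars.isdigit c
    · cases cs with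
      | nil => simp [hd, pvNoDigHead]
      | cons d ds =>
        by_cases hdd : PySem.Chars.isdigit d <;>
          simp [hd, hdd, pvNoDigHead]
    · simp [hd]

theorem pvSRec_true_eq_false (cs : List Char) (h : pvNoDigHead cs = true) :
    pvSRec true cs = pvSRec false cs := by
  cases cs with
  | nil => rfl
  | cons c cs =>
    have : PySem.Chars.isdigit c = false := by
      simpa [pvNoDigHead] using h
    simp [pvSRec, this]

theorem pvSRec_true_digits (ds : List Char) : ∀ (rest : List Char),
    (∀ d ∈ ds, PySem.Chars.isdigit d = true) → pvNoDigHead rest = true →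
    pvSRec true (ds ++ rest) = (pvSRec false rest).map (· + ds.length) := by
  induction ds with
  | nil =>
    intro rest _ hrest
    simp [pvSRec_true_eq_false rest hrest]
  | cons d ds ih =>
    intro rest h hrest
    have hd : PySem.Chars.isdigit d = true := h d (List.mem_cons_self ..)
    rw [List.cons_append, pvSRec, hd, ih rest (fun x hx => h x (List.mem_cons_of_mem _ hx)) hrest]
    have hcomp : ((fun x => x + 1) ∘ fun x => x + ds.length) = (fun x => x + (ds.length + 1)) :=
      funext fun x => by show x + ds.length + 1 = x + (ds.length + 1); omega
    simp [List.map_map, hcomp]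

theorem pvSRec_digits (ds : List Char) (rest : List Char)
    (hne : ds ≠ []) (h : ∀ d ∈ ds, PySem.Chars.isdigit d = true) (hrest : pvNoDigHead rest = true) :
    pvSRec false (ds ++ rest) = 0 :: (pvSRec false rest).map (· + ds.length) := by
  cases ds with
  | nil => exact absurd rfl hne
  | cons d ds =>
    have hd : PySem.Chars.isdigit d = true := h d (List.mem_cons_self ..)
    rw [List.cons_append, pvSRec, hd,
      pvSRec_true_digits ds rest (fun x hx => h x (List.mem_cons_of_mem _ hx)) hrest]
    have hcomp : ((fun x => x + 1) ∘ fun x => x + ds.length) = (fun x => x + (ds.length + 1)) :=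
      funext fun x => by show x + ds.length + 1 = x + (ds.length + 1); omega
    simp [List.map_map, hcomp]

theorem pvERec_digits (ds : List Char) : ∀ (rest : List Char),
    ds ≠ [] → (∀ d ∈ ds, PySem.Chars.isdigit d = true) → pvNoDigHead rest = true →
    pvERec (ds ++ rest) = (ds.length - 1) :: (pvERec rest).map (· + ds.length) := by
  induction ds with
  | nil => intro rest hne _ _; exact absurd rfl hne
  | cons d ds ih =>
    intro rest _ h hrest
    have hd : PySem.Chars.isdigit d = true := h d (List.mem_cons_self ..)
    cases ds with
    | nil =>
      rw [List.cons_append, List.nil_append, pvERec, hd]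
      simp [hrest]
    | cons d2 ds2 =>
      have hd2 : PySem.Chars.isdigit d2 = true := h d2 (by simp)
      have hhead : pvNoDigHead ((d2 :: ds2) ++ rest) = false := by
        simp [pvNoDigHead, hd2]
      rw [List.cons_append, pvERec, hhead,
        ih rest (by simp) (fun x hx => h x (List.mem_cons_of_mem _ hx)) hrest]
      have hcomp : ((fun x => x + 1) ∘ fun x => x + (ds2.length + 1))
          = (fun x => x + (ds2.length + 1 + 1)) :=
        funext fun x => by show x + (ds2.length + 1) + 1 = x + (ds2.length + 1 + 1); omega
      simp [List.map_map, hcomp]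

-- the assembled output for an explicit boundary pair list, with accumulator and prev exposed
def pvRunZ (cs : List Char) (z : List (Nat × Nat)) (acc : List Char) (p : Nat) : List Char :=
  (z.foldl (pvStepB cs) (acc, p)).1
    ++ (pvSlice cs (z.foldl (pvStepB cs) (acc, p)).2 cs.length).flatMap pvEscB

theorem pvSlice_shift (x : Char) (cs : List Char) (a b : Nat) :
    pvSlice (x :: cs) (a + 1) (b + 1) = pvSlice cs a b := by
  simp [pvSlice]

theorem pvFoldB_shift1 (x : Char) (cs : List Char) (z : List (Nat × Nat)) :
    ∀ (acc : List Char) (p : Nat),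
    (z.map (fun se => (se.1 + 1, se.2 + 1))).foldl (pvStepB (x :: cs)) (acc, p + 1)
      = ((z.foldl (pvStepB cs) (acc, p)).1, (z.foldl (pvStepB cs) (acc, p)).2 + 1) := by
  induction z with
  | nil => intro acc p; rfl
  | cons se z ih =>
    intro acc p
    simp only [List.map_cons, List.foldl_cons, pvStepB, pvSlice_shift]
    have h2 : se.2 + 1 - (se.1 + 1) = se.2 - se.1 := by omega
    rw [h2]
    exact ih _ (se.2 + 1)

theorem pvRunZ_shift1 (x : Char) (cs : List Char) (z : List (Nat × Nat))
    (acc : List Char) (p : Nat) :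
    pvRunZ (x :: cs) (z.map (fun se => (se.1 + 1, se.2 + 1))) acc (p + 1)
      = pvRunZ cs z acc p := by
  unfold pvRunZ
  rw [pvFoldB_shift1 x cs z acc p]
  simp only [List.length_cons, pvSlice_shift]

theorem pvRunZ_prefix (ds : List Char) : ∀ (cs : List Char) (z : List (Nat × Nat))
    (acc : List Char) (p : Nat),
    pvRunZ (ds ++ cs) (z.map (fun se => (se.1 + ds.length, se.2 + ds.length))) acc (p + ds.length)
      = pvRunZ cs z acc p := by
  induction ds with
  | nil => intro cs z acc p; simp
  | cons d ds ih =>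
    intro cs z acc p
    have hm : z.map (fun se => (se.1 + (ds.length + 1), se.2 + (ds.length + 1)))
        = (z.map (fun se => (se.1 + ds.length, se.2 + ds.length))).map
            (fun se => (se.1 + 1, se.2 + 1)) := by
      rw [List.map_map]
      apply List.map_congr_left
      intro se _
      simp only [Function.comp_apply, Prod.mk.injEq]
      omega
    simp only [List.length_cons, List.cons_append]
    rw [show p + (ds.length + 1) = (p + ds.length) + 1 by omega, hm,
      pvRunZ_shift1, ih]

-- prepending any one char to the list adds its escape before the assembly of the rest
theorem pvRunZ_cons0 (x : Char) (cs : List Char) (z : List (Nat × Nat)) :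
    ∀ (acc : List Char),
    pvRunZ (x :: cs) (z.map (fun se => (se.1 + 1, se.2 + 1))) acc 0
      = pvRunZ cs z (acc ++ pvEscB x) 0 := by
  cases z with
  | nil =>
    intro acc
    unfold pvRunZ
    simp [pvSlice]
  | cons se z =>
    intro acc
    unfold pvRunZ
    simp only [List.map_cons, List.foldl_cons, pvStepB]
    have h1 : pvSlice (x :: cs) 0 (se.1 + 1) = x :: pvSlice cs 0 se.1 := by
      simp [pvSlice]
    have h2 : se.2 + 1 - (se.1 + 1) = se.2 - se.1 := by omega
    rw [h1, h2]
    rw [pvFoldB_shift1 x cs z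
      (acc ++ (x :: pvSlice cs 0 se.1).flatMap pvEscB ++ pvTok (se.2 - se.1 + 1)) (se.2 + 1)]
    simp only [List.length_cons, pvSlice_shift]
    simp [List.append_assoc]

theorem pvMain (cs : List Char) : ∀ (acc : List Char),
    pvRunZ cs ((pvSRec false cs).zip (pvERec cs)) acc 0 = acc ++ (pvEmit 0 cs).flatten := by
  match cs with
  | [] =>
    intro acc
    simp [pvSRec, pvERec, pvRunZ, pvSlice, pvEmit]
  | c :: cs =>
    intro acc
    by_cases hd : PySem.Chars.isdigit c
    · -- the string starts with a maximal digit run ds; one token, then the shifted rest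
      have hsplit : c :: cs = (c :: cs).takeWhile PySem.Chars.isdigit ++
          (c :: cs).dropWhile PySem.Chars.isdigit := (List.takeWhile_append_dropWhile).symm
      set ds := (c :: cs).takeWhile PySem.Chars.isdigit with hds
      set rest := (c :: cs).dropWhile PySem.Chars.isdigit with hrest
      have hall : ∀ d ∈ ds, PySem.Chars.isdigit d = true := fun d hdm => List.mem_takeWhile_imp hdm
      have hne : ds ≠ [] := by rw [hds]; simp [hd]
      have hLpos : 1 ≤ ds.length := by
        cases hds' : ds with
        | nil => exact absurd hds' hne
        | cons _ _ => simp
      have hnodig : pvNoDigHead rest = true := by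
        cases hdr : rest with
        | nil => rfl
        | cons r rs =>
          have := List.head?_dropWhile_not PySem.Chars.isdigit (c :: cs)
          rw [← hrest, hdr] at this
          simp only [List.head?_cons] at this
          simpa [pvNoDigHead] using this
      have hlen : rest.length < (c :: cs).length := by
        have hsp : (c :: cs).length = ds.length + rest.length := by
          rw [hsplit, List.length_append]
        omega
      have hrec := pvMain rest
      rw [hsplit, pvSRec_digits ds rest hne hall hnodig, pvERec_digits ds rest hne hall hnodig]
      rw [List.zip_cons_cons, List.zip_map]
      have hmap : List.map (Prod.map (· + ds.length) (· + ds.length))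
            ((pvSRec false rest).zip (pvERec rest))
          = ((pvSRec false rest).zip (pvERec rest)).map
              (fun se => (se.1 + ds.length, se.2 + ds.length)) := by
        apply List.map_congr_left
        intro se _
        rfl
      rw [hmap]
      unfold pvRunZ
      rw [List.foldl_cons]
      have hstep : pvStepB (ds ++ rest) (acc, 0) (0, ds.length - 1)
          = (acc ++ pvTok ds.length, ds.length) := by
        unfold pvStepB pvSlice
        simp only [Nat.sub_zero, List.take_zero, List.flatMap_nil, List.append_nil]
        rw [show ds.length - 1 + 1 = ds.length from by omega]
      rw [hstep]
      have hpre := pvRunZ_prefix ds rest ((pvSRec false rest).zip (pvERec rest))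
        (acc ++ pvTok ds.length) 0
      unfold pvRunZ at hpre
      rw [Nat.zero_add] at hpre
      have hrec' := hrec (acc ++ pvTok ds.length)
      unfold pvRunZ at hrec'
      rw [hpre, hrec']
      have hemit : (pvEmit 0 (ds ++ rest)).flatten = pvTok ds.length ++ (pvEmit 0 rest).flatten := by
        rw [pvEmit_digits ds rest 0 hall, Nat.zero_add]
        cases hdr : rest with
        | nil => simp [pvEmit, show ds.length ≠ 0 by omega]
        | cons r rs =>
          have hr : PySem.Chars.isdigit r = false := by
            rw [hdr] at hnodig
            simpa [pvNoDigHead] using hnodig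
          simp [pvEmit, hr, show ds.length ≠ 0 by omega]
      rw [hemit, List.append_assoc]
    · -- non-digit head: its escape comes first, then the assembly of the tail
      have hrec := pvMain cs
      rw [pvSRec, pvERec]
      have h1 : (PySem.Chars.isdigit c && !false) = false := by simp [hd]
      have h2 : (PySem.Chars.isdigit c && pvNoDigHead cs) = false := by simp [hd]
      have hdf : PySem.Chars.isdigit c = false := by simpa using hd
      rw [h1, h2, hdf]
      simp only [Bool.false_eq_true, if_false, List.nil_append]
      rw [List.zip_map]
      have hmap : List.map (Prod.map (· + 1) (· + 1)) ((pvSRec false cs).zip (pvERec cs))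
          = ((pvSRec false cs).zip (pvERec cs)).map (fun se => (se.1 + 1, se.2 + 1)) := by
        apply List.map_congr_left
        intro se _
        rfl
      rw [hmap, pvRunZ_cons0, hrec (acc ++ pvEscB c)]
      have : pvEmit 0 (c :: cs) = pvEscB c :: pvEmit 0 cs := by
        rw [pvEmit, if_neg (by simp [hd])]
        simp
      rw [this]
      simp
termination_by cs.length
decreasing_by
  · exact hlen
  · exact Nat.lt_succ_self _

-- "".join with empty separator is concatenation
theorem pvJoin_nil_flatten (xss : List (List Char)) :
    PySem.Chars.join [] xss = xss.flatten := by
  induction xss with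
  | nil => simp [PySem.Chars.join_nil]
  | cons xs xss ih =>
    cases xss with
    | nil => simp [PySem.Chars.join_singleton]
    | cons ys yss =>
      rw [PySem.Chars.join_cons_cons, ih]
      simp

-- ===== VERDICT (by name: the statement is the Claim_ definition above) =====
theorem pattern_from_filename_py_spec : Claim_equal_pattern_from_filename_py := by
  intro name _
  simp only [Spec_pattern_from_filename_py, pattern_from_filename_py,
    pattern_from_filename_py_alt]
  rw [pvFoldA_eq_emit name.toList [] 0, pvJoin_nil_flatten,
    pvStartsB_eq_sFil, pvSFil_eq_sRec, pvEndsB_eq_eRec]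
  have h := pvMain name.toList ['^']
  unfold pvRunZ at h
  rw [h]
  simp
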